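-- pv_equiv track=rewrite | github.com/Marisathaingam/Discrete-Maths | Unit18-Marisa_Thaingam/marisa_thaingam_task8.py | check_inverse
-- ===== SOURCE A (Python) =====
-- Z = [1, 2, 4, 5, 7, 8]
--
-- def mult_mod9(a, b):
--     return (a * b) % 9
--
-- def check_inverse(unit):
--     inverses = {}
--     for a in Z:
--         found = False
--         for b in Z:
--             if mult_mod9(a, b) == unit and mult_mod9(b, a) == unit:
--                 inverses[a] = b
--                 found = True
--                 break
--         if not found:
--             return False, {}
--     return True, inverses
-- ===== SOURCE B (Python) =====
-- Z = [1, 2, 4, 5, 7, 8]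
--
-- def check_inverse(unit):
--     # Phase 1 (independent of unit): for each a, index the row of the
--     # Cayley table: product value -> first b in Z producing it.
--     rows = []
--     for a in Z:
--         row = {}
--         for b in Z:
--             p = (a * b) % 9
--             if p not in row:
--                 row[p] = b
--         rows.append((a, row))
--     # Phase 2: look `unit` up in each row.
--     inverses = {}
--     for a, row in rows:
--         if unit not in row:
--             return False, {}
--         inverses[a] = row[unit]
--     return True, inverses
-- ===== Notes on version B (the rewrite author's own statement) =====
-- stated objective: alternative
-- what changed: Replaces the per-a linear search with break by a two-phase algorithm: first build, independently of unit, an index per row of the Cayley table mapping each product value to the first b producing it, then a separate lookup pass that fills inverses or fails fast.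
import Mathlib
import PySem

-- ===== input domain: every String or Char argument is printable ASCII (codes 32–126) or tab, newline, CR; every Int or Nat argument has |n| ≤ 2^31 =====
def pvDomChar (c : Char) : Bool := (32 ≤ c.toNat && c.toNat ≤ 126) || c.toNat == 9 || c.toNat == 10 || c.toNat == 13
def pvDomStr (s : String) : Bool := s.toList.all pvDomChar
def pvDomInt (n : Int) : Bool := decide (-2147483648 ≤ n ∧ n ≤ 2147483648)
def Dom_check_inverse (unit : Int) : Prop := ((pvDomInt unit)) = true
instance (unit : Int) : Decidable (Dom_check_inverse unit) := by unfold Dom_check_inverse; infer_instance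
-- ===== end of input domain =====

-- B restructures A's single nested search into two phases: a unit-independent
-- index (per row of the Cayley table, product -> first b) built once, then a
-- plain lookup pass; objective: alternative decomposition, same cost.

-- ===== PORT A =====
def pvZ : List Int := [1, 2, 4, 5, 7, 8]

def mult_mod9 (a b : Int) : Int := PySem.Int.mod (a * b) 9

-- inner 'for b in Z: … break' with the found flag, as first-match recursion
def pvFindB (unit a : Int) : List Int → Option Int
  | [] => none
  | b :: rest =>
    if mult_mod9 a b = unit ∧ mult_mod9 b a = unit then some b
    else pvFindB unit a rest

def pvLoopA (unit : Int) : List Int → PySem.Dict Int Int → Bool × (List (Int × Int))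
  | [], inverses => (true, inverses.items)
  | a :: rest, inverses =>
    match pvFindB unit a pvZ with
    | some b => pvLoopA unit rest (inverses.insert a b)
    | none => (false, [])

def check_inverse (unit : Int) : Bool × (List (Int × Int)) :=
  pvLoopA unit pvZ PySem.Dict.empty

-- ===== PORT B =====
-- phase 1 inner loop: row[p] = b for the first b reaching each product p
def pvRow (a : Int) : List Int → PySem.Dict Int Int → PySem.Dict Int Int
  | [], row => row
  | b :: rest, row => pvRow a rest (row.setdefault (PySem.Int.mod (a * b) 9) b)

-- phase 1 outer loop: rows.append((a, row))
def pvRows : List Int → List (Int × PySem.Dict Int Int)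
  | [] => []
  | a :: rest => (a, pvRow a pvZ PySem.Dict.empty) :: pvRows rest

-- phase 2: look unit up in each prebuilt row
def pvVerify (unit : Int) : List (Int × PySem.Dict Int Int) → PySem.Dict Int Int → Bool × (List (Int × Int))
  | [], inverses => (true, inverses.items)
  | (a, row) :: rest, inverses =>
    match row.get? unit with
    | some b => pvVerify unit rest (inverses.insert a b)
    | none => (false, [])

def check_inverse_alt (unit : Int) : Bool × (List (Int × Int)) :=
  pvVerify unit (pvRows pvZ) PySem.Dict.empty

-- ===== PRECONDITION & SPEC =====
def Spec_check_inverse (unit : Int) (out : Bool × (List (Int × Int))) : Prop := out = check_inverse_alt unit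
instance (unit : Int) (out : Bool × (List (Int × Int))) : Decidable (Spec_check_inverse unit out) := by unfold Spec_check_inverse; infer_instance

-- ===== CLAIM (what is proved, stated in full; the proofs are below) =====
def Claim_equal_check_inverse : Prop := ∀ (unit : Int), Dom_check_inverse unit → Spec_check_inverse unit (check_inverse unit)

-- ===== LEMMAS AND PROOFS =====

-- ===== VERDICT (by name: the statement is the Claim_ definition above) =====
theorem check_inverse_spec : Claim_equal_check_inverse := by
  intro u _
  unfold Spec_check_inverse
  by_cases h1 : u = 1; · subst h1; decide
  by_cases h2 : u = 2; · subst h2; decide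
  by_cases h4 : u = 4; · subst h4; decide
  by_cases h5 : u = 5; · subst h5; decide
  by_cases h7 : u = 7; · subst h7; decide
  by_cases h8 : u = 8; · subst h8; decide
  simp [check_inverse, check_inverse_alt, pvLoopA, pvFindB, pvVerify, pvRows, pvRow,
        mult_mod9, pvZ, PySem.Int.mod, PySem.Dict.setdefault, PySem.Dict.insert,
        PySem.Dict.contains, PySem.Dict.get?, PySem.Dict.empty]
  split_ifs <;> simp_all
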